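-- pv_equiv track=rewrite | github.com/danjane/GymInf | linkComments.py | get_student_codes_names_course_names
-- ===== SOURCE A (Python) =====
-- from typing import Dict, List, Tuple
--
-- def get_student_codes_names_course_names(courses: Dict[str, Dict[str, str]]) -> Tuple[List[str], List[str], List[str]]:
--     student_codes = []
--     student_names = []
--     course_names = []
--     for course, kids in courses.items():
--         student_codes += list(kids.keys())
--         student_names += list(kids.values())
--         course_names += [course] * len(kids)
--     return student_codes, student_names, course_names
-- ===== SOURCE B (Python) =====
-- def get_student_codes_names_course_names(courses):
--     triples = [(code, name, course)
--                for course, kids in courses.items()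
--                for code, name in kids.items()]
--     if not triples:
--         return [], [], []
--     codes, names, course_names = map(list, zip(*triples))
--     return codes, names, course_names
-- ===== Notes on version B (the rewrite author's own statement) =====
-- stated objective: alternative
-- what changed: B builds one flat row-major list of (code, name, course) triples with a nested comprehension and then transposes it with zip(*...) into the three columns, instead of appending to three parallel accumulator lists per course.
import Mathlib
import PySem

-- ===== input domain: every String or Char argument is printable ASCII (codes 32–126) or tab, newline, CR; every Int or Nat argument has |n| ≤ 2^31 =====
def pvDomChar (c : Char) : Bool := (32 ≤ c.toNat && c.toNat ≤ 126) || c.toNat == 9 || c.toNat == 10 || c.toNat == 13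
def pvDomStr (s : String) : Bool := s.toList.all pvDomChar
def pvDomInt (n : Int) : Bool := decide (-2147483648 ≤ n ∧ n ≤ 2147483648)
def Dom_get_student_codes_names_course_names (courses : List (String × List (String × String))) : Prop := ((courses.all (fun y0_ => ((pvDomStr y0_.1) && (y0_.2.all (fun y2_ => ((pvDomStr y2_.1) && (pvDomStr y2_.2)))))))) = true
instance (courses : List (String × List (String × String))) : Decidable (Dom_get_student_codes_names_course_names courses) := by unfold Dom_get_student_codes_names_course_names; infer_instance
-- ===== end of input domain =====

-- B flattens the dict into one row-major list of (code, name, course) triples and then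
-- transposes it into the three columns; A appends to three parallel accumulators per course.

-- ===== PORT A =====
-- loop over courses.items(), extending three accumulator lists
def get_student_codes_names_course_names (courses : List (String × List (String × String))) : List String × List String × List String :=
  courses.foldl
    (fun st p =>
      (st.1 ++ p.2.map Prod.fst,
       st.2.1 ++ p.2.map Prod.snd,
       st.2.2 ++ List.replicate p.2.length p.1))
    ([], [], [])

-- ===== PORT B =====
-- nested comprehension building the flat triple list (row-major)
def pvTriples (courses : List (String × List (String × String))) : List (String × String × String) :=
  courses.flatMap (fun p => p.2.map (fun q => (q.1, q.2, p.1)))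

def get_student_codes_names_course_names_alt (courses : List (String × List (String × String))) : List String × List String × List String :=
  let triples := pvTriples courses
  if triples = [] then ([], [], [])   -- Python: zip(*[]) would unpack to nothing
  else (triples.map (·.1), triples.map (·.2.1), triples.map (·.2.2))

-- ===== PRECONDITION & SPEC =====
def Spec_get_student_codes_names_course_names (courses : List (String × List (String × String))) (out : List String × List String × List String) : Prop := out = get_student_codes_names_course_names_alt courses
instance (courses : List (String × List (String × String))) (out : List String × List String × List String) : Decidable (Spec_get_student_codes_names_course_names courses out) := by unfold Spec_get_student_codes_names_course_names; infer_instance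

-- ===== CLAIM (what is proved, stated in full; the proofs are below) =====
def Claim_equal_get_student_codes_names_course_names : Prop := ∀ (courses : List (String × List (String × String))), Dom_get_student_codes_names_course_names courses → Spec_get_student_codes_names_course_names courses (get_student_codes_names_course_names courses)

-- ===== LEMMAS AND PROOFS =====
theorem pv_foldl_eq (courses : List (String × List (String × String)))
    (a b c : List String) :
    courses.foldl
      (fun st p =>
        (st.1 ++ p.2.map Prod.fst,
         st.2.1 ++ p.2.map Prod.snd,
         st.2.2 ++ List.replicate p.2.length p.1))
      (a, b, c)
    = (a ++ (pvTriples courses).map (·.1),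
       b ++ (pvTriples courses).map (·.2.1),
       c ++ (pvTriples courses).map (·.2.2)) := by
  induction courses generalizing a b c with
  | nil => simp [pvTriples]
  | cons p t ih =>
    simp [List.foldl_cons, ih, pvTriples, List.flatMap_cons, List.map_append,
      List.map_map, List.append_assoc, Function.comp_def, List.map_const']

-- ===== VERDICT (by name: the statement is the Claim_ definition above) =====
theorem get_student_codes_names_course_names_spec : Claim_equal_get_student_codes_names_course_names := by
  intro courses _
  unfold Spec_get_student_codes_names_course_names get_student_codes_names_course_names
  unfold get_student_codes_names_course_names_alt
  rw [pv_foldl_eq]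
  by_cases h : pvTriples courses = [] <;> simp [h]
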